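-- pv_equiv track=rewrite | github.com/Sabarinath-11/4PEL---Dashboard | app.py | find_mis_sheet
-- ===== SOURCE A (Python) =====
-- def find_mis_sheet(sheet_names):
--     for s in sheet_names:
--         su = s.upper().replace(' ','')
--         if 'MIS' in su and 'ERP' in su:
--             return s
--     for s in sheet_names:
--         if 'MIS' in s.upper():
--             return s
--     return sheet_names[0]
-- ===== SOURCE B (Python) =====
-- def find_mis_sheet(sheet_names):
--     fallback = None
--     for s in sheet_names:
--         su = s.upper().replace(' ', '')
--         if 'MIS' in su and 'ERP' in su:
--             return s
--         if fallback is None and 'MIS' in s.upper():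
--             fallback = s
--     return fallback if fallback is not None else sheet_names[0]
-- ===== Notes on version B (the rewrite author's own statement) =====
-- stated objective: simpler
-- what changed: Replaces A's two sequential scans by a single pass that returns the first MIS+ERP sheet immediately while recording the first MIS-only sheet as a fallback.
import Mathlib
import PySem

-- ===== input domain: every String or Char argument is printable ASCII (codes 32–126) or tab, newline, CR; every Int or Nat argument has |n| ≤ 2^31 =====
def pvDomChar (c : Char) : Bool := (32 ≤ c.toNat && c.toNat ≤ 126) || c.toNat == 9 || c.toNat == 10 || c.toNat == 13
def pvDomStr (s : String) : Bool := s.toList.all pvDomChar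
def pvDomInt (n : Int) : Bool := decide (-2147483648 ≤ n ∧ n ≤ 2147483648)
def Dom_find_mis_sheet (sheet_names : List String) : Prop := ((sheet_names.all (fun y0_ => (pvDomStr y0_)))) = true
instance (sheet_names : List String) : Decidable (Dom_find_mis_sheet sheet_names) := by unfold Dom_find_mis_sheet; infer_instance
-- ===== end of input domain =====

-- B replaces A's two sequential scans with a single pass that tracks the first MIS-only sheet as a fallback (objective: simpler, one pass instead of two).


-- ===== PORT A =====
-- first loop: first s with 'MIS' and 'ERP' both in s.upper().replace(' ','')
def pvLoop1 : List String → Option String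
  | [] => none
  | s :: rest =>
    let su := PySem.Str.replace (PySem.Str.upper s) " " ""
    if PySem.Str.isIn "MIS" su && PySem.Str.isIn "ERP" su then some s else pvLoop1 rest

-- second loop: first s with 'MIS' in s.upper()
def pvLoop2 : List String → Option String
  | [] => none
  | s :: rest =>
    if PySem.Str.isIn "MIS" (PySem.Str.upper s) then some s else pvLoop2 rest

def find_mis_sheet (sheet_names : List String) : String :=
  match pvLoop1 sheet_names with
  | some s => s
  | none =>
    match pvLoop2 sheet_names with
    | some s => s
    | none => (PySem.List.pyGet? sheet_names 0).getD ""   -- sheet_names[0]; none (IndexError) excluded by Pre_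

-- ===== PORT B =====
-- single pass carrying the fallback (first MIS-only sheet); orig kept for sheet_names[0]
def pvAltLoop : List String → Option String → List String → String
  | [], fb, orig => fb.getD ((PySem.List.pyGet? orig 0).getD "")   -- IndexError case excluded by Pre_
  | s :: rest, fb, orig =>
    let su := PySem.Str.replace (PySem.Str.upper s) " " ""
    if PySem.Str.isIn "MIS" su && PySem.Str.isIn "ERP" su then s
    else pvAltLoop rest (if fb.isNone && PySem.Str.isIn "MIS" (PySem.Str.upper s) then some s else fb) orig

def find_mis_sheet_alt (sheet_names : List String) : String :=
  pvAltLoop sheet_names none sheet_names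

-- ===== PRECONDITION & SPEC =====
-- Pre_ excludes only the empty list, where Python A raises IndexError on sheet_names[0] (B raises there too).
def Pre_find_mis_sheet (sheet_names : List String) : Prop := sheet_names ≠ []
instance (sheet_names : List String) : Decidable (Pre_find_mis_sheet sheet_names) := by unfold Pre_find_mis_sheet; infer_instance
def pvWitness_find_mis_sheet : List String := ["Summary", "MIS ERP"]

def Spec_find_mis_sheet (sheet_names : List String) (out : String) : Prop := out = find_mis_sheet_alt sheet_names
instance (sheet_names : List String) (out : String) : Decidable (Spec_find_mis_sheet sheet_names out) := by unfold Spec_find_mis_sheet; infer_instance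

-- ===== CLAIM (what is proved, stated in full; the proofs are below) =====
def Claim_equal_find_mis_sheet : Prop := ∀ (sheet_names : List String), Dom_find_mis_sheet sheet_names → Pre_find_mis_sheet sheet_names → Spec_find_mis_sheet sheet_names (find_mis_sheet sheet_names)

-- ===== LEMMAS AND PROOFS =====
-- Invariant of B's single pass: it equals "first MIS+ERP match, else fallback-or-first-MIS, else head".
theorem pvAltLoop_eq (xs : List String) : ∀ (fb : Option String) (orig : List String),
    pvAltLoop xs fb orig =
      match pvLoop1 xs with
      | some s => s
      | none => (fb.orElse (fun _ => pvLoop2 xs)).getD ((PySem.List.pyGet? orig 0).getD "") := by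
  induction xs with
  | nil => intro fb orig; cases fb <;> simp [pvAltLoop, pvLoop1, pvLoop2, Option.orElse]
  | cons s rest ih =>
    intro fb orig
    simp only [pvAltLoop, pvLoop1, pvLoop2]
    split_ifs with h1 h2 <;> simp_all [ih, Option.orElse] <;> cases fb <;> simp_all [Option.orElse]

-- ===== VERDICT (by name: the statement is the Claim_ definition above) =====
theorem find_mis_sheet_spec : Claim_equal_find_mis_sheet := by
  intro xs _ _
  unfold Spec_find_mis_sheet find_mis_sheet find_mis_sheet_alt
  rw [pvAltLoop_eq]
  cases pvLoop1 xs <;> cases h2 : pvLoop2 xs <;> simp [Option.orElse, h2]
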